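-- pv_equiv track=rewrite | github.com/Brioflator/MaterialeFMI | Anul 1/Sem 1/Programarea Algo/Phyton/Facultate/test lab ex.py/problema 1.py | conditie
-- ===== SOURCE A (Python) =====
-- def conditie(a):
--     q = a % 10
--     while a >= 10:
--         a = a//10
--     if q == a:
--         return 1
--     else:
--         return 0
-- ===== SOURCE B (Python) =====
-- def conditie(a):
--     s = str(a)
--     return 1 if s[0] == s[-1] else 0
-- ===== Notes on version B (the rewrite author's own statement) =====
-- stated objective: simpler
-- what changed: Replaces the digit-stripping division loop with a single str(a) conversion and a comparison of its first and last characters (for negatives the leading '-' never equals a digit, matching A's 0).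
import Mathlib
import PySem

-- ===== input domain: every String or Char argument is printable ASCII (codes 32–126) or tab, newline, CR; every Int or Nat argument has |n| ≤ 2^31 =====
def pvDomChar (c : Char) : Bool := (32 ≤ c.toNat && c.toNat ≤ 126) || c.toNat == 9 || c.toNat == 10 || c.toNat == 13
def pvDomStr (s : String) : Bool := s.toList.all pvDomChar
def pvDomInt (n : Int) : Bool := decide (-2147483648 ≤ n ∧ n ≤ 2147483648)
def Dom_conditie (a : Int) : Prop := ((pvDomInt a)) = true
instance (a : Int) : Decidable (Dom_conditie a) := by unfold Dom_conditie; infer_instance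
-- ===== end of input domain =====

-- B replaces A's digit-stripping division loop by one str(a) conversion and a
-- comparison of the string's first and last characters (objective: simpler).

-- ===== PORT A =====
-- the 'while a >= 10: a = a // 10' loop of A
def condLoop (a : Int) : Int :=
  if _h : 10 ≤ a then condLoop (PySem.Int.floordiv a 10) else a
termination_by a.toNat
decreasing_by
  simp only [PySem.Int.floordiv, Int.fdiv_eq_ediv]
  omega

def conditie (a : Int) : Int :=
  let q := PySem.Int.mod a 10
  let a' := condLoop a
  if q = a' then 1 else 0

-- ===== PORT B =====
def conditie_alt (a : Int) : Int :=
  let s := PySem.Int.toStr a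
  if PySem.Str.pyGet? s 0 = PySem.Str.pyGet? s (-1) then 1 else 0

-- ===== PRECONDITION & SPEC =====
def Spec_conditie (a : Int) (out : Int) : Prop := out = conditie_alt a
instance (a : Int) (out : Int) : Decidable (Spec_conditie a out) := by unfold Spec_conditie; infer_instance

-- ===== CLAIM (what is proved, stated in full; the proofs are below) =====
def Claim_equal_conditie : Prop := ∀ (a : Int), Dom_conditie a → Spec_conditie a (conditie a)

-- ===== LEMMAS AND PROOFS =====

-- the decimal digit characters of n, most significant first (= Nat.toDigits 10 n)
def digitsChars (n : Nat) : List Char :=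
  if _h : n < 10 then [Nat.digitChar n]
  else digitsChars (n / 10) ++ [Nat.digitChar (n % 10)]
termination_by n
decreasing_by omega

-- the leading decimal digit of n (= A's loop on nonnegative input)
def firstDigit (n : Nat) : Nat :=
  if _h : n < 10 then n else firstDigit (n / 10)
termination_by n
decreasing_by omega

theorem toDigitsCore_shift (f : Nat) : ∀ (n : Nat) (acc : List Char),
    Nat.toDigitsCore 10 f n acc = Nat.toDigitsCore 10 f n [] ++ acc := by
  induction f with
  | zero => intro n acc; simp [Nat.toDigitsCore]
  | succ f ih =>
    intro n acc
    simp only [Nat.toDigitsCore]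
    by_cases h : n / 10 = 0
    · simp [h]
    · simp only [h, if_false]
      rw [ih (n / 10) (Nat.digitChar (n % 10) :: acc),
          ih (n / 10) (Nat.digitChar (n % 10) :: [])]
      simp

theorem toDigitsCore_eq_digitsChars (f : Nat) : ∀ (n : Nat), n < f →
    Nat.toDigitsCore 10 f n [] = digitsChars n := by
  induction f with
  | zero => intro n h; omega
  | succ f ih =>
    intro n hn
    simp only [Nat.toDigitsCore]
    by_cases h : n / 10 = 0
    · have h10 : n < 10 := by omega
      rw [digitsChars]
      simp [h, h10, Nat.mod_eq_of_lt h10]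
    · have h10 : ¬ n < 10 := by omega
      simp only [h, if_false]
      rw [toDigitsCore_shift, ih (n / 10) (by omega)]
      conv_rhs => rw [digitsChars]
      simp [h10]

theorem toDigits_eq (n : Nat) : Nat.toDigits 10 n = digitsChars n :=
  toDigitsCore_eq_digitsChars (n + 1) n (by omega)

theorem digitsChars_ne_nil (n : Nat) : digitsChars n ≠ [] := by
  rw [digitsChars]
  by_cases h : n < 10 <;> simp [h]

theorem digitsChars_getLast? (n : Nat) :
    (digitsChars n).getLast? = some (Nat.digitChar (n % 10)) := by
  rw [digitsChars]
  by_cases h : n < 10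
  · simp [h, Nat.mod_eq_of_lt h]
  · simp [h, List.getLast?_append]

theorem digitsChars_head? (n : Nat) :
    (digitsChars n).head? = some (Nat.digitChar (firstDigit n)) := by
  induction n using Nat.strong_induction_on with
  | _ n ih =>
    rw [digitsChars, firstDigit]
    by_cases h : n < 10
    · simp [h]
    · have hne := digitsChars_ne_nil (n / 10)
      simp only [h, dif_neg, not_false_iff]
      rw [List.head?_append_of_ne_nil _ hne]
      exact ih (n / 10) (by omega)

theorem firstDigit_lt (n : Nat) : firstDigit n < 10 := by
  induction n using Nat.strong_induction_on with
  | _ n ih =>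
    rw [firstDigit]
    by_cases h : n < 10
    · simp [h]
    · simp only [h, dif_neg, not_false_iff]
      exact ih (n / 10) (by omega)

theorem digitChar_inj : ∀ d < 10, ∀ e < 10, Nat.digitChar d = Nat.digitChar e → d = e := by decide

theorem digitChar_ne_dash : ∀ d < 10, Nat.digitChar d ≠ '-' := by decide

theorem getLast?_cons_ne_nil {α : Type} (a : α) (l : List α) (h : l ≠ []) :
    (a :: l).getLast? = l.getLast? := by
  cases l with
  | nil => exact absurd rfl h
  | cons b t => exact List.getLast?_cons_cons

theorem condLoop_natCast (n : Nat) : condLoop (n : Int) = ((firstDigit n : Nat) : Int) := by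
  induction n using Nat.strong_induction_on with
  | _ n ih =>
    rw [condLoop, firstDigit]
    by_cases h : n < 10
    · rw [dif_neg (by omega : ¬ (10 : Int) ≤ (n : Int)), dif_pos h]
    · have hfd : PySem.Int.floordiv (n : Int) 10 = ((n / 10 : Nat) : Int) := by
        simp only [PySem.Int.floordiv, Int.fdiv_eq_ediv]
        omega
      rw [dif_pos (by omega : (10 : Int) ≤ (n : Int)), dif_neg h, hfd]
      exact ih (n / 10) (by omega)

theorem conditie_eq_alt (a : Int) : conditie a = conditie_alt a := by
  rcases le_or_gt 0 a with ha | ha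
  · -- a ≥ 0 : compare leading digit with last digit
    obtain ⟨n, rfl⟩ : ∃ n : Nat, a = (n : Int) := ⟨a.toNat, by omega⟩
    have hchars : PySem.Int.toChars (n : Int) = digitsChars n := by
      simp only [PySem.Int.toChars]
      rw [if_neg (by omega)]
      exact toDigits_eq n
    have hmod : PySem.Int.mod (n : Int) 10 = ((n % 10 : Nat) : Int) := by
      simp only [PySem.Int.mod, Int.fmod_eq_emod]
      omega
    have h0 : PySem.List.pyGet? (digitsChars n) 0 = some (Nat.digitChar (firstDigit n)) := by
      rw [PySem.List.pyGet?_zero, ← List.head?_eq_getElem?, digitsChars_head?]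
    have h1 : PySem.List.pyGet? (digitsChars n) (-1) = some (Nat.digitChar (n % 10)) := by
      rw [PySem.List.pyGet?_neg_one, digitsChars_getLast?]
    simp only [conditie, conditie_alt, PySem.Str.pyGet?, PySem.Chars.pyGet?,
      PySem.Int.toList_toStr, hchars, hmod, condLoop_natCast, h0, h1, Option.some.injEq]
    by_cases h : firstDigit n = n % 10
    · simp [h]
    · have hInt : ¬ ((n % 10 : Nat) : Int) = ((firstDigit n : Nat) : Int) := by
        intro hc
        exact h (by exact_mod_cast hc.symm)
      have hChar : ¬ Nat.digitChar (firstDigit n) = Nat.digitChar (n % 10) :=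
        fun hc => h (digitChar_inj _ (firstDigit_lt n) _ (Nat.mod_lt n (by omega)) hc)
      rw [if_neg hInt, if_neg hChar]
  · -- a < 0 : A's loop leaves a untouched and q ≥ 0 > a; B sees '-' ≠ digit
    have hq : 0 ≤ PySem.Int.mod a 10 := by
      simp only [PySem.Int.mod, Int.fmod_eq_emod]
      omega
    have hloop : condLoop a = a := by
      rw [condLoop, dif_neg (by omega : ¬ (10 : Int) ≤ a)]
    have hchars : PySem.Int.toChars a = '-' :: digitsChars a.natAbs := by
      simp only [PySem.Int.toChars]
      rw [if_pos ha, toDigits_eq]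
    have h0 : PySem.List.pyGet? ('-' :: digitsChars a.natAbs) 0 = some '-' :=
      PySem.List.pyGet?_zero_cons _ _
    have h1 : PySem.List.pyGet? ('-' :: digitsChars a.natAbs) (-1) =
        some (Nat.digitChar (a.natAbs % 10)) := by
      rw [PySem.List.pyGet?_neg_one,
          getLast?_cons_ne_nil _ _ (digitsChars_ne_nil _), digitsChars_getLast?]
    simp only [conditie, conditie_alt, PySem.Str.pyGet?, PySem.Chars.pyGet?,
      PySem.Int.toList_toStr, hchars, hloop, h0, h1]
    rw [if_neg (by omega), if_neg ?_]
    intro hc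
    exact digitChar_ne_dash _ (Nat.mod_lt _ (by omega)) (Option.some.inj hc).symm

-- ===== VERDICT (by name: the statement is the Claim_ definition above) =====
theorem conditie_spec : Claim_equal_conditie := by
  intro a _
  unfold Spec_conditie
  exact conditie_eq_alt a
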